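-- pv_equiv track=rewrite | github.com/penguinc00kies/CSC110-Jamie | csc110/tutorials/week09/tutorial9_part2.py | leftmost
-- ===== SOURCE A (Python) =====
-- import math
--
-- def leftmost(points: set[tuple[int, int]]) -> tuple[int, int]:
--     """Return the leftmost (smallest x-coordinate) point in points.
--
--     If there is a tie, return the one with the smallest y-coordinate.
--
--     Note: because we're using pygame's coordinate system here, small y-coordinates
--     translate to *higher* points in the visualization window.
--
--     Preconditions:
--         - points != set()
--
--     >>> my_set = {(150, 350), (200, 100), (250, 200), (425, 100)}
--     >>> leftmost(my_set)
--     (150, 350)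
--     >>> my_set = {(150, 350), (150, 100), (150, 200), (150, 100)}
--     >>> leftmost(my_set)
--     (150, 100)
--     """
--     leftmost_so_far = (math.inf, math.inf)
--     for cord in points:
--         if cord[0] < leftmost_so_far[0]:
--             leftmost_so_far = cord
--         elif cord[0] == leftmost_so_far[0] and cord[1] < leftmost_so_far[1]:
--             leftmost_so_far = cord
--
--     return leftmost_so_far
-- ===== SOURCE B (Python) =====
-- def leftmost(points):
--     return sorted(points)[0]
-- ===== Notes on version B (the rewrite author's own statement) =====
-- stated objective: idiomatic
-- what changed: Replaces A's one-pass running-minimum scan with (inf,inf) sentinel by sorting the points (Python's lexicographic tuple order) and taking the first element.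
-- outside the precondition, e.g. on leftmost(set()): A returns (inf, inf), B raises IndexError
import Mathlib
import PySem

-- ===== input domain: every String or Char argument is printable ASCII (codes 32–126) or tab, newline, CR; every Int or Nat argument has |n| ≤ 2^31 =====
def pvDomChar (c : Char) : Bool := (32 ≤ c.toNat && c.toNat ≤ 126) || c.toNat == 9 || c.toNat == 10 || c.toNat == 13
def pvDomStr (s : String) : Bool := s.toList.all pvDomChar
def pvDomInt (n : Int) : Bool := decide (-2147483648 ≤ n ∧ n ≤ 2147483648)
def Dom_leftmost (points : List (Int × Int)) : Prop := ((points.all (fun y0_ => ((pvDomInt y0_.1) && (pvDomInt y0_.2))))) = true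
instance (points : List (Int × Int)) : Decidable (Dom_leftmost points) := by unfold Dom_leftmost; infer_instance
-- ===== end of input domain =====

-- B replaces A's running-minimum scan with sort-then-take-first (same result; not faster).

-- ===== PORT A =====
-- A starts from the float sentinel (inf, inf); we model the accumulator as an
-- Option: 'none' is the sentinel (every real point's x beats inf, so the first
-- point always replaces it).  The 'none' fallback at the end is unreachable
-- under Pre_leftmost (Python would return the non-int pair (inf, inf) there).
def leftmost (points : List (Int × Int)) : Int × Int :=
  match points.foldl
      (fun acc cord =>
        match acc with
        | none => some cord
        | some l =>
          if cord.1 < l.1 then some cord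
          else if cord.1 = l.1 ∧ cord.2 < l.2 then some cord
          else some l)
      (none : Option (Int × Int)) with
  | some p => p
  | none => (0, 0)

-- ===== PORT B =====
-- sorted(points)[0]; Python compares tuples lexicographically, which is the
-- Lex order on Int × Int (key toLex).  Index 0 via pyGetD (IndexError on the
-- empty list is excluded by Pre_leftmost).
def leftmost_alt (points : List (Int × Int)) : Int × Int :=
  PySem.List.pyGetD (PySem.List.sorted points (fun p => toLex p) false) 0 (0, 0)

-- ===== PRECONDITION & SPEC =====
-- Pre_ excludes only the empty list, on which A returns the float sentinel
-- (inf, inf) — not a value of type Int × Int — and B raises IndexError.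
def Pre_leftmost (points : List (Int × Int)) : Prop := points ≠ []
instance (points : List (Int × Int)) : Decidable (Pre_leftmost points) := by unfold Pre_leftmost; infer_instance
def pvWitness_leftmost : (List (Int × Int)) := [(150, 350), (200, 100), (250, 200), (425, 100)]
def Spec_leftmost (points : List (Int × Int)) (out : Int × Int) : Prop := out = leftmost_alt points
instance (points : List (Int × Int)) (out : Int × Int) : Decidable (Spec_leftmost points out) := by unfold Spec_leftmost; infer_instance

-- ===== CLAIM (what is proved, stated in full; the proofs are below) =====
def Claim_equal_leftmost : Prop := ∀ (points : List (Int × Int)), Dom_leftmost points → Pre_leftmost points → Spec_leftmost points (leftmost points)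

-- ===== LEMMAS AND PROOFS =====

-- A's branch pair is exactly 'take cord iff it is lex-smaller'.
theorem stepA_eq (l cord : Int × Int) :
    (if cord.1 < l.1 then some cord
     else if cord.1 = l.1 ∧ cord.2 < l.2 then some cord
     else some l)
    = some (if toLex cord < toLex l then cord else l) := by
  rcases l with ⟨a, b⟩; rcases cord with ⟨c, d⟩
  by_cases h1 : c < a
  · simp [h1, Prod.Lex.lt_iff]
  · by_cases h2 : c = a ∧ d < b
    · simp [h2, Prod.Lex.lt_iff]
    · have hlt : ¬ toLex ((c, d) : Int × Int) < toLex ((a, b) : Int × Int) := by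
        rw [Prod.Lex.lt_iff]
        rintro (h | h)
        · exact h1 h
        · exact h2 ⟨h.1, h.2⟩
      simp [h1, h2, hlt]

def lexmin (l c : Int × Int) : Int × Int := if toLex c < toLex l then c else l

theorem foldA_eq (points : List (Int × Int)) (a : Int × Int) :
    points.foldl
      (fun acc cord =>
        match acc with
        | none => some cord
        | some l =>
          if cord.1 < l.1 then some cord
          else if cord.1 = l.1 ∧ cord.2 < l.2 then some cord
          else some l)
      (some a) = some (points.foldl lexmin a) := by
  induction points generalizing a with
  | nil => rfl
  | cons x xs ih =>
    simp only [List.foldl]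
    rw [stepA_eq, ih]
    rfl

theorem foldl_lexmin_mem (points : List (Int × Int)) (a : Int × Int) :
    points.foldl lexmin a ∈ a :: points := by
  induction points generalizing a with
  | nil => simp [List.foldl]
  | cons x xs ih =>
    simp only [List.foldl]
    rcases List.mem_cons.1 (ih (lexmin a x)) with h | h
    · rw [h]
      unfold lexmin
      split_ifs <;> simp
    · simp [h]

theorem foldl_lexmin_le (points : List (Int × Int)) (a : Int × Int) :
    ∀ y ∈ a :: points, toLex (points.foldl lexmin a) ≤ toLex y := by
  induction points generalizing a with
  | nil => intro y hy; simp at hy; simp [List.foldl, hy]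
  | cons x xs ih =>
    intro y hy
    simp only [List.foldl]
    have hmin_a : toLex (lexmin a x) ≤ toLex a := by
      unfold lexmin; split_ifs with h
      · exact le_of_lt h
      · exact le_of_eq rfl
    have hmin_x : toLex (lexmin a x) ≤ toLex x := by
      unfold lexmin; split_ifs with h
      · exact le_of_eq rfl
      · exact le_of_not_gt h
    have hacc := ih (lexmin a x) (lexmin a x) (List.mem_cons_self ..)
    rcases List.mem_cons.1 hy with hy | hy
    · rw [hy]; exact le_trans hacc hmin_a
    · rcases List.mem_cons.1 hy with hy | hy
      · rw [hy]; exact le_trans hacc hmin_x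
      · exact ih (lexmin a x) y (List.mem_cons.2 (Or.inr hy))

theorem min_unique (xs : List (Int × Int)) (m₁ m₂ : Int × Int)
    (h₁ : m₁ ∈ xs) (h₂ : m₂ ∈ xs)
    (l₁ : ∀ y ∈ xs, toLex m₁ ≤ toLex y) (l₂ : ∀ y ∈ xs, toLex m₂ ≤ toLex y) :
    m₁ = m₂ := by
  have := le_antisymm (l₁ m₂ h₂) (l₂ m₁ h₁)
  exact toLex.injective this

-- ===== VERDICT (by name: the statement is the Claim_ definition above) =====
theorem leftmost_spec : Claim_equal_leftmost := by
  intro points _ hpre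
  unfold Spec_leftmost leftmost leftmost_alt
  rcases points with _ | ⟨p, ps⟩
  · exact absurd rfl hpre
  -- A's side
  simp only [List.foldl]
  rw [foldA_eq]
  -- B's side: head of the sorted list
  rcases hs : PySem.List.sorted (p :: ps) (fun p => toLex p) false with _ | ⟨m, t⟩
  · have := PySem.List.length_sorted (p :: ps) (fun p => toLex p) false
    rw [hs] at this; simp at this
  · have hmem : m ∈ p :: ps := by
      have : m ∈ PySem.List.sorted (p :: ps) (fun p => toLex p) false := by
        rw [hs]; exact List.mem_cons_self ..
      exact (PySem.List.mem_sorted (p :: ps) (fun p => toLex p) false m).1 this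
    have hle : ∀ y ∈ p :: ps, toLex m ≤ toLex y :=
      PySem.List.key_head_sorted_le (p :: ps) (fun p => toLex p) hs
    have hamem : ps.foldl lexmin p ∈ p :: ps := foldl_lexmin_mem ps p
    have hale : ∀ y ∈ p :: ps, toLex (ps.foldl lexmin p) ≤ toLex y := foldl_lexmin_le ps p
    rw [PySem.List.pyGetD_zero_cons]
    exact min_unique (p :: ps) _ m hamem hmem hale hle
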